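-- pv_equiv track=rewrite | github.com/petezh/RR-NLP-Tools | predicates/search.py | buildTuples
-- ===== SOURCE A (Python) =====
-- def getIndices(termText, sentence):
--
--     lower = -1
--     upper = -1
--
--     try:
--         lower = sentence.index(termText)
--         upper = lower + len(termText)
--     except ValueError:
--         pass
--
--     return (lower, upper)
--
-- def buildTuples(sentence, terms, verbs, level):
--
--     tuples = list()
--
--     beg = -1
--     end = -1
--     term = ""
--
--     for term in terms:
--
--         start, stop = getIndices(term[1], sentence)
--         end = start
--         if end > beg:
--             for verb in verbs:
--                 if not sentence.find(verb, beg, end) == -1: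
--                     tuples.append([lastTerm[1], verb, term[1], level])
--         beg = stop
--         lastTerm = term
--
--     return tuples
-- ===== SOURCE B (Python) =====
-- import bisect
--
-- def buildTuples(sentence, terms, verbs, level):
--     # Each distinct verb's sorted occurrence positions are computed once; every
--     # adjacent term pair then needs only one binary search per verb.
--     occ = {}
--     for v in verbs:
--         if v not in occ:
--             pos = []
--             i = sentence.find(v)
--             while i != -1:
--                 pos.append(i)
--                 i = sentence.find(v, i + 1)
--             occ[v] = pos
--     tuples = []
--     for prev, cur in zip(terms, terms[1:]):
--         lo = sentence.find(prev[1])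
--         hi = sentence.find(cur[1])
--         if lo == -1 or hi == -1:
--             continue
--         lo += len(prev[1])
--         if lo > hi:
--             continue
--         for v in verbs:
--             pos = occ[v]
--             j = bisect.bisect_left(pos, lo)
--             if j < len(pos) and pos[j] + len(v) <= hi:
--                 tuples.append([prev[1], v, cur[1], level])
--     return tuples
-- ===== Notes on version B (the rewrite author's own statement) =====
-- stated objective: alternative
-- what changed: B precomputes every verb's sorted occurrence-position list once and walks adjacent term pairs with zip, answering each term-verb window test by one binary search, instead of A's stateful scan that re-searches the sentence per term-verb pair; Pre_ excludes exactly the inputs where A raises UnboundLocalError.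
-- intended difference: On inputs with an empty-string verb where some adjacent term pair has its first term absent from the sentence (A's leftover beg=-1 makes str.find search from the last character and match '') or has the two terms' occurrences exactly touching (A's beg<end gate drops the empty window), A emits/drops a tuple for the empty verb; B skips absent-term pairs and treats the empty window uniformly, the intended reading since an empty 'verb between the terms' is meaningless. — e.g. on buildTuples("ab", [("N", "x"), ("N", "b")], [""], "L"): A returns [["x", "", "b", "L"]], B returns []
import Mathlib
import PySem

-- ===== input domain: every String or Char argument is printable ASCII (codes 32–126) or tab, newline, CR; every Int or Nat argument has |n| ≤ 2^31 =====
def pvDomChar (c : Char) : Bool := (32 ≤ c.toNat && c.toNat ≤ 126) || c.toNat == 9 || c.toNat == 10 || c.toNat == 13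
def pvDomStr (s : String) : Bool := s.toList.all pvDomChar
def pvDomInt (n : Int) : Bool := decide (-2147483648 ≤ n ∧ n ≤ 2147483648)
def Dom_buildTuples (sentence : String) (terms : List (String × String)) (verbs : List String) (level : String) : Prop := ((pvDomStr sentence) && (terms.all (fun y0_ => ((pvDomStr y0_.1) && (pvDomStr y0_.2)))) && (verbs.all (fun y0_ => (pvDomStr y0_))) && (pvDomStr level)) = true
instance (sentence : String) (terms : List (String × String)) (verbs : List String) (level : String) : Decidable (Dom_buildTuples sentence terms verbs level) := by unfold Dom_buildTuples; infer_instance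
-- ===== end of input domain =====

-- B precomputes each verb's sorted occurrence positions once and walks adjacent
-- term pairs, deciding each term-verb window by one binary search, instead of A's
-- stateful scan re-searching the sentence per term-verb pair (objective: alternative).

-- ===== PORT A =====
-- getIndices: sentence.index(termText) with the ValueError caught (find = -1 keeps (-1,-1))
def getIndicesA (termText : List Char) (sentence : List Char) : Int × Int :=
  let lower := PySem.Chars.find sentence termText
  if lower = -1 then (-1, -1) else (lower, lower + (termText.length : Int))

-- one iteration of A's 'for term in terms' loop; state = (tuples, beg, lastTerm).
-- lastTerm starts as "": under Pre_ it is never read before A's loop has assigned it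
-- (where Python A would read it unassigned it raises UnboundLocalError — outside Pre_).
def stepA (sentence : List Char) (verbs : List String) (level : String)
    (st : List (List String) × Int × String) (term : String × String) :
    List (List String) × Int × String :=
  let tuples := st.1
  let beg := st.2.1
  let lastTerm := st.2.2
  let p := getIndicesA term.2.toList sentence
  let endv := p.1
  let tuples :=
    if beg < endv then
      verbs.foldl (fun acc verb =>
        if PySem.Chars.findFrom sentence verb.toList beg (some endv) ≠ -1 then
          acc ++ [[lastTerm, verb, term.2, level]]
        else acc) tuples
    else tuples
  (tuples, p.2, term.2)

def buildTuples (sentence : String) (terms : List (String × String)) (verbs : List String) (level : String) : List (List String) :=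
  (terms.foldl (stepA sentence.toList verbs level) ([], -1, "")).1

-- ===== PORT B =====
-- pos = []; i = sentence.find(v); (while i != -1: pos.append(i); i = sentence.find(v, i+1))
-- (the fuel argument only makes the same loop total: found positions strictly increase
--  and stay ≤ len(sentence), so s.length + 2 steps are never exhausted)
def occLoop (s v : List Char) (i : Int) : Nat → List Int
  | 0 => []
  | fuel + 1 =>
    if i = -1 then [] else i :: occLoop s v (PySem.Chars.findFrom s v (i + 1) none) fuel

def occB (s : List Char) (v : List Char) : List Int :=
  occLoop s v (PySem.Chars.find s v) (s.length + 2)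

-- occ = {}; for v in verbs: if v not in occ: occ[v] = <the while loop above>
def buildOccB (s : List Char) (verbs : List String) : PySem.Dict String (List Int) :=
  verbs.foldl (fun d v => if d.contains v then d else d.insert v (occB s v.toList)) PySem.Dict.empty

-- j = bisect.bisect_left(pos, lo); j < len(pos) and pos[j] + len(v) <= hi
def verbCheckB (pos : List Int) (vlen : Int) (lo hi : Int) : Bool :=
  match pos[PySem.List.bisectLeft pos lo]? with
  | some x => decide (x + vlen ≤ hi)
  | none => false

-- one adjacent pair (prev, cur) of B's loop over zip(terms, terms[1:])
def pairStepB (s : List Char) (occ : PySem.Dict String (List Int)) (verbs : List String)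
    (level : String) (acc : List (List String)) (pc : (String × String) × (String × String)) :
    List (List String) :=
  let lo0 := PySem.Chars.find s pc.1.2.toList
  let hi := PySem.Chars.find s pc.2.2.toList
  if lo0 = -1 ∨ hi = -1 then acc
  else
    let lo := lo0 + (pc.1.2.toList.length : Int)
    if hi < lo then acc
    else verbs.foldl (fun acc v =>
      -- pos = occ[v]; the dict holds every v ∈ verbs, so the lookup never misses
      let pos := (occ.get? v).getD []
      if verbCheckB pos (v.toList.length : Int) lo hi then acc ++ [[pc.1.2, v, pc.2.2, level]]
      else acc) acc

def buildTuples_alt (sentence : String) (terms : List (String × String)) (verbs : List String) (level : String) : List (List String) :=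
  let s := sentence.toList
  let occ := buildOccB s verbs
  (terms.zip terms.tail).foldl (pairStepB s occ verbs level) []

-- ===== PRECONDITION & SPEC =====
-- Pre_ excludes exactly the inputs on which the Python A raises UnboundLocalError:
-- the verbs contain "" and the first term is found at position ≥ len(sentence)-1,
-- so A appends a tuple reading 'lastTerm' before its first assignment.
def Pre_buildTuples (sentence : String) (terms : List (String × String)) (verbs : List String) (level : String) : Prop :=
  ¬ ∃ t ∈ terms.take 1, "" ∈ verbs ∧
      max 0 ((sentence.toList.length : Int) - 1) ≤ PySem.Chars.find sentence.toList t.2.toList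
instance (sentence : String) (terms : List (String × String)) (verbs : List String) (level : String) : Decidable (Pre_buildTuples sentence terms verbs level) := by unfold Pre_buildTuples; infer_instance

def pvWitness_buildTuples : String × (List (String × String)) × List String × String :=
  ("the cat ate the rat", [("N", "cat"), ("N", "rat")], ["ate"], "1")

-- On inputs with an empty-string verb where some adjacent term pair has its first term
-- absent from the sentence (A's leftover beg = -1 makes str.find search from the last
-- character and match "") or has the two terms' occurrences exactly touching (A's
-- beg < end gate drops the empty window), A emits/drops a tuple for the empty verb;
-- B skips absent-term pairs and treats the empty window uniformly — the intended
-- reading, since an empty 'verb between the terms' is meaningless.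
def D_buildTuples (sentence : String) (terms : List (String × String)) (verbs : List String) (level : String) : Prop :=
  "" ∈ verbs ∧ ∃ pc ∈ terms.zip terms.tail,
    (PySem.Chars.find sentence.toList pc.1.2.toList = -1 ∧
      max 0 ((sentence.toList.length : Int) - 1) ≤ PySem.Chars.find sentence.toList pc.2.2.toList)
    ∨ (0 ≤ PySem.Chars.find sentence.toList pc.1.2.toList ∧
      PySem.Chars.find sentence.toList pc.1.2.toList + (pc.1.2.toList.length : Int)
        = PySem.Chars.find sentence.toList pc.2.2.toList)
instance (sentence : String) (terms : List (String × String)) (verbs : List String) (level : String) : Decidable (D_buildTuples sentence terms verbs level) := by unfold D_buildTuples; infer_instance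

def Spec_buildTuples (sentence : String) (terms : List (String × String)) (verbs : List String) (level : String) (out : List (List String)) : Prop := ¬ D_buildTuples sentence terms verbs level → out = buildTuples_alt sentence terms verbs level
instance (sentence : String) (terms : List (String × String)) (verbs : List String) (level : String) (out : List (List String)) : Decidable (Spec_buildTuples sentence terms verbs level out) := by unfold Spec_buildTuples; infer_instance

def pvDiffWitness_buildTuples : String × (List (String × String)) × List String × String :=
  ("ab", [("N", "x"), ("N", "b")], [""], "L")
def pvDiffWitnessOut_buildTuples : (List (List String)) × (List (List String)) :=
  ([["x", "", "b", "L"]], [])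

-- ===== CLAIM (what is proved, stated in full; the proofs are below) =====
def Claim_unchanged_buildTuples : Prop := ∀ (sentence : String) (terms : List (String × String)) (verbs : List String) (level : String), Dom_buildTuples sentence terms verbs level → Pre_buildTuples sentence terms verbs level → Spec_buildTuples sentence terms verbs level (buildTuples sentence terms verbs level)
def Claim_changed_buildTuples : Prop := Dom_buildTuples (pvDiffWitness_buildTuples.1) (pvDiffWitness_buildTuples.2.1) (pvDiffWitness_buildTuples.2.2.1) (pvDiffWitness_buildTuples.2.2.2) ∧ Pre_buildTuples (pvDiffWitness_buildTuples.1) (pvDiffWitness_buildTuples.2.1) (pvDiffWitness_buildTuples.2.2.1) (pvDiffWitness_buildTuples.2.2.2) ∧ D_buildTuples (pvDiffWitness_buildTuples.1) (pvDiffWitness_buildTuples.2.1) (pvDiffWitness_buildTuples.2.2.1) (pvDiffWitness_buildTuples.2.2.2) ∧ buildTuples (pvDiffWitness_buildTuples.1) (pvDiffWitness_buildTuples.2.1) (pvDiffWitness_buildTuples.2.2.1) (pvDiffWitness_buildTuples.2.2.2) = pvDiffWitnessOut_buildTuples.1 ∧ buildTuples_alt (pvDiffWitness_buildTuples.1) (pvDiffWitness_buildTuples.2.1)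 (pvDiffWitness_buildTuples.2.2.1) (pvDiffWitness_buildTuples.2.2.2) = pvDiffWitnessOut_buildTuples.2 ∧ pvDiffWitnessOut_buildTuples.1 ≠ pvDiffWitnessOut_buildTuples.2
-- ===== LEMMAS AND PROOFS =====

-- the filter characterisation of the occurrence lists, and lemmas about it
def occFilter (s v : List Char) : List Int :=
  (PySem.List.pyRange 0 ((s.length : Int) - (v.length : Int) + 1)).filter
    (fun i => decide (v <+: s.drop i.toNat))

theorem mem_occFilter (s v : List Char) (i : Int) :
    i ∈ occFilter s v ↔ 0 ≤ i ∧ i + (v.length : Int) ≤ (s.length : Int) ∧ v <+: s.drop i.toNat := by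
  simp only [occFilter, List.mem_filter, PySem.List.mem_pyRange_one, decide_eq_true_eq]
  constructor
  · rintro ⟨⟨h0, hlt⟩, hp⟩
    exact ⟨h0, by omega, hp⟩
  · rintro ⟨h0, hle, hp⟩
    exact ⟨⟨h0, by omega⟩, hp⟩

theorem occFilter_sorted_lt (s v : List Char) : (occFilter s v).Pairwise (· < ·) := by
  apply List.Pairwise.filter
  by_cases h : (0:Int) < (s.length : Int) - (v.length : Int) + 1
  · have : ((s.length : Int) - (v.length : Int) + 1) = ((((s.length : Int) - (v.length : Int) + 1).toNat : Nat) : Int) := by omega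
    rw [this, PySem.List.pyRange_zero_natCast]
    exact (List.pairwise_lt_range.map _ (by intro a b hab; exact_mod_cast hab))
  · have : PySem.List.pyRange 0 ((s.length : Int) - (v.length : Int) + 1) = [] := by
      apply List.eq_nil_iff_forall_not_mem.mpr
      intro x hx
      rw [PySem.List.mem_pyRange_one] at hx
      omega
    rw [this]; exact List.Pairwise.nil

-- str.find(v, st) with st past the end of the string is -1 (even for v = '')
theorem findFrom_past (s v : List Char) (st : Int) (h0 : 0 ≤ st) (hst : (s.length : Int) < st) :
    PySem.Chars.findFrom s v st none = -1 := by
  simp only [PySem.Chars.findFrom]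
  split_ifs <;> omega

-- str.find(v, st) returns an index into s (or -1)
theorem findFrom_le_length (s v : List Char) (st : Int) :
    PySem.Chars.findFrom s v st none ≤ (s.length : Int) := by
  set st' : Int := if st < 0 then (if st + (s.length : Int) < 0 then 0 else st + (s.length : Int)) else st with hst'
  simp only [PySem.Chars.findFrom, ← hst']
  by_cases hlt : (s.length : Int) < st'
  · rw [if_pos hlt]; omega
  · rw [if_neg hlt]
    have h1 := PySem.Chars.find_le_length (List.drop st'.toNat (List.take ((s.length : Int)).toNat s)) v
    simp only [List.length_drop, List.length_take] at h1
    split_ifs with h2 <;> omega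

-- splitting the ≥ k part of a strictly sorted list at its least element ≥ k
theorem sorted_filter_ge_eq_cons (l : List Int) (hl : l.Pairwise (· < ·)) (k r : Int)
    (hrl : r ∈ l) (hkr : k ≤ r) (hmin : ∀ x ∈ l, k ≤ x → r ≤ x) :
    l.filter (fun i => decide (k ≤ i)) = r :: l.filter (fun i => decide (r + 1 ≤ i)) := by
  induction l with
  | nil => cases hrl
  | cons x tl ih =>
    have hlt : ∀ y ∈ tl, x < y := fun y hy => List.rel_of_pairwise_cons hl hy
    by_cases hx : x = r
    · subst hx
      have htl : tl.filter (fun i => decide (k ≤ i)) = tl.filter (fun i => decide (x + 1 ≤ i)) := by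
        apply List.filter_congr
        intro y hy
        have := hlt y hy
        simp only [decide_eq_decide]
        omega
      simp only [List.filter_cons, decide_eq_true_eq]
      rw [if_pos hkr, if_neg (by omega : ¬ (x + 1 ≤ x))]
      rw [htl]
    · have hrtl : r ∈ tl := by
        rcases List.mem_cons.mp hrl with h | h
        · exact absurd h.symm hx
        · exact h
      have hxr : x < r := hlt r hrtl
      have hnk : ¬ (k ≤ x) := fun hc => absurd (hmin x (List.mem_cons_self) hc) (by omega)
      simp only [List.filter_cons, decide_eq_true_eq]
      rw [if_neg hnk, if_neg (by omega : ¬ (r + 1 ≤ x))]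
      exact ih (List.Pairwise.of_cons hl) hrtl (fun y hy hky => hmin y (List.mem_cons_of_mem x hy) hky)

-- the find-loop from position k collects exactly the occurrences ≥ k, in order
theorem occLoop_eq (s v : List Char) (fuel : Nat) (k : Nat) (hk : k ≤ s.length + 1)
    (hfuel : s.length + 2 - k ≤ fuel) :
    occLoop s v (PySem.Chars.findFrom s v (k : Int) none) fuel =
      (occFilter s v).filter (fun i => decide ((k : Int) ≤ i)) := by
  induction fuel generalizing k with
  | zero => omega
  | succ fuel ih =>
    by_cases hr : PySem.Chars.findFrom s v (k : Int) none = -1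
    · rw [occLoop, if_pos hr]
      symm
      rw [List.filter_eq_nil_iff]
      intro i hi
      simp only [decide_eq_true_eq]
      intro hki
      rw [mem_occFilter] at hi
      obtain ⟨h0, hlen, hp⟩ := hi
      by_cases hkn : k ≤ s.length
      · rw [PySem.Chars.findFrom_natCast_eq_neg_one_iff s v k hkn] at hr
        apply hr
        rw [← PySem.Chars.isIn_iff_infix, ← PySem.Chars.exists_prefix_drop_iff_isIn]
        refine ⟨i.toNat - k, ?_⟩
        rw [List.drop_drop]
        have heq : k + (i.toNat - k) = i.toNat := by omega
        rw [heq]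
        exact hp
      · -- k = s.length + 1 : no occurrence can lie at ≥ k at all
        have hvl : (0:Int) ≤ (v.length : Int) := by positivity
        omega
    · have hkn : k ≤ s.length := by
        by_contra hc
        exact hr (findFrom_past s v (k : Int) (by positivity) (by omega))
      obtain ⟨hkr, hpre, hmin⟩ := PySem.Chars.findFrom_natCast_spec s v k hkn hr
      set r := PySem.Chars.findFrom s v (k : Int) none with hrdef
      have hrn : r ≤ (s.length : Int) := findFrom_le_length s v (k : Int)
      have hr0 : 0 ≤ r := by omega
      have hrlen : r + (v.length : Int) ≤ (s.length : Int) := by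
        have := hpre.length_le
        simp only [List.length_drop] at this
        omega
      have hrmem : r ∈ occFilter s v := by
        rw [mem_occFilter]
        exact ⟨hr0, hrlen, hpre⟩
      rw [occLoop, if_neg hr]
      have hcast : r + 1 = ((r.toNat + 1 : Nat) : Int) := by omega
      rw [hcast, ih (r.toNat + 1) (by omega) (by omega)]
      symm
      rw [← hcast]
      apply sorted_filter_ge_eq_cons (occFilter s v) (occFilter_sorted_lt s v) (k : Int) r hrmem hkr
      · intro x hx hkx
        rw [mem_occFilter] at hx
        obtain ⟨hx0, hxlen, hxp⟩ := hx
        by_contra hc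
        have hxr : x.toNat < r.toNat := by omega
        have hkx' : k ≤ x.toNat := by omega
        exact hmin x.toNat hkx' hxr hxp

-- the port's occurrence list IS the list of all occurrence positions, ascending
theorem occB_eq (s v : List Char) : occB s v = occFilter s v := by
  unfold occB
  have h0 : PySem.Chars.find s v = PySem.Chars.findFrom s v ((0 : Nat) : Int) none := by
    simp
  rw [h0, occLoop_eq s v (s.length + 2) 0 (by omega) (by omega)]
  apply List.filter_eq_self.mpr
  intro i hi
  rw [mem_occFilter] at hi
  simp only [Nat.cast_zero, decide_eq_true_eq]
  exact hi.1

theorem mem_occB (s v : List Char) (i : Int) :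
    i ∈ occB s v ↔ 0 ≤ i ∧ i + (v.length : Int) ≤ (s.length : Int) ∧ v <+: s.drop i.toNat := by
  rw [occB_eq]; exact mem_occFilter s v i

theorem occB_sorted (s v : List Char) : (occB s v).Pairwise (· ≤ ·) := by
  rw [occB_eq]
  exact (occFilter_sorted_lt s v).imp le_of_lt

-- infix of a window  ↔  an occurrence that fits in the window
theorem infix_window_iff (s v : List Char) (a b : Nat) (hab : a ≤ b) :
    v <:+: (s.take b).drop a ↔ ∃ j : Nat, a ≤ j ∧ j + v.length ≤ b ∧ v <+: s.drop j := by
  rw [← PySem.Chars.isIn_iff_infix, ← PySem.Chars.exists_prefix_drop_iff_isIn]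
  constructor
  · rintro ⟨j', hp⟩
    rw [List.drop_drop, List.drop_take] at hp
    rw [List.prefix_take_iff] at hp
    obtain ⟨hp, hlen⟩ := hp
    by_cases hc : j' + a ≤ b
    · exact ⟨a + j', by omega, by omega, hp⟩
    · have hv : v = [] := by
        have : b - (a + j') = 0 := by omega
        rw [this] at hlen
        exact List.eq_nil_of_length_eq_zero (by omega)
      subst hv
      exact ⟨a, le_refl a, by simpa using hab, List.nil_prefix⟩
  · rintro ⟨j, haj, hjb, hp⟩
    refine ⟨j - a, ?_⟩
    rw [List.drop_drop, List.drop_take, List.prefix_take_iff]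
    have heq : a + (j - a) = j := by omega
    rw [heq]
    exact ⟨hp, by omega⟩

-- A's window test, characterised by the occurrences it accepts
theorem condA_iff (s v : List Char) (beg e : Int)
    (hbeg : beg = -1 ∨ (0 ≤ beg ∧ beg ≤ (s.length : Int))) (he0 : 0 ≤ e) (hen : e ≤ (s.length : Int)) :
    (PySem.Chars.findFrom s v beg (some e) ≠ -1) ↔
      ∃ i : Int, (if beg < 0 then max 0 (beg + (s.length : Int)) else beg) ≤ i ∧ 0 ≤ i ∧
        i + (v.length : Int) ≤ e ∧ v <+: s.drop i.toNat := by
  have hmn : ¬ ((s.length : Int) < e) := by omega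
  have hme : ¬ (e < 0) := by omega
  set st : Int := if beg < 0 then (if beg + (s.length : Int) < 0 then 0 else beg + (s.length : Int)) else beg with hst
  have hst0 : 0 ≤ st := by rw [hst]; split_ifs <;> omega
  have hstn : st ≤ (s.length : Int) := by rw [hst]; split_ifs <;> omega
  have hsteq : (if beg < 0 then max 0 (beg + (s.length : Int)) else beg) = st := by
    rw [hst]; split_ifs <;> omega
  rw [hsteq]
  simp only [PySem.Chars.findFrom, hmn, if_false, hme, ← hst]
  by_cases hlt : e < st
  · simp only [hlt, if_true]
    constructor
    · intro h; exact absurd rfl h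
    · rintro ⟨i, h1, h2, h3, _⟩
      have : (0:Int) ≤ (v.length : Int) := by positivity
      omega
  · simp only [hlt, if_false]
    have hfind := PySem.Chars.neg_one_le_find ((s.take e.toNat).drop st.toNat) v
    have key : PySem.Chars.find ((s.take e.toNat).drop st.toNat) v ≠ -1 ↔
        ∃ i : Int, st ≤ i ∧ 0 ≤ i ∧ i + (v.length : Int) ≤ e ∧ v <+: s.drop i.toNat := by
      rw [PySem.Chars.find_ne_neg_one_iff, infix_window_iff s v st.toNat e.toNat (by omega)]
      constructor
      · rintro ⟨j, h1, h2, h3⟩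
        exact ⟨(j : Int), by omega, by positivity, by omega, h3⟩
      · rintro ⟨i, h1, h2, h3, h4⟩
        exact ⟨i.toNat, by omega, by omega, h4⟩
    by_cases hr : PySem.Chars.find ((s.take e.toNat).drop st.toNat) v = -1
    · simp only [hr, if_true]
      rw [← key]
      constructor
      · intro h; exact absurd rfl h
      · intro h; exact absurd hr h
    · simp only [hr, if_false]
      rw [← key]
      constructor
      · intro _; exact hr
      · intro _; omega

-- B's binary-search test accepts exactly the same occurrences
theorem condB_iff (s v : List Char) (lo e : Int) (hen : e ≤ (s.length : Int)) :
    verbCheckB (occB s v) (v.length : Int) lo e = true ↔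
      ∃ i : Int, lo ≤ i ∧ 0 ≤ i ∧ i + (v.length : Int) ≤ e ∧ v <+: s.drop i.toNat := by
  have hsorted := occB_sorted s v
  obtain ⟨hlen, hbefore, hafter⟩ := PySem.List.bisectLeft_spec (occB s v) lo hsorted
  set lst := occB s v with hlst
  set j := PySem.List.bisectLeft lst lo with hj
  unfold verbCheckB
  rw [← hj]
  rcases hx : lst[j]? with _ | x
  · -- bisect index past the end: no occurrence ≥ lo exists
    have hjl : lst.length ≤ j := by
      by_contra hc
      rw [List.getElem?_eq_getElem (by omega)] at hx
      cases hx
    constructor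
    · intro h; cases h
    · rintro ⟨i, h1, h2, h3, h4⟩
      have hmem : i ∈ lst := by rw [hlst, mem_occB]; exact ⟨h2, by omega, h4⟩
      obtain ⟨k, hk, hik⟩ := List.getElem_of_mem hmem
      have hblt := hbefore k hk (by omega)
      rw [hik] at hblt
      omega
  · have hjl : j < lst.length := by
      by_contra hc
      rw [List.getElem?_eq_none (by omega)] at hx
      cases hx
    have hxx : lst[j] = x := by
      rw [List.getElem?_eq_getElem hjl] at hx
      exact Option.some.inj hx
    simp only [decide_eq_true_eq]
    constructor
    · intro h
      have hmem : lst[j] ∈ lst := List.getElem_mem hjl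
      rw [hxx] at hmem
      rw [hlst, mem_occB] at hmem
      refine ⟨x, ?_, hmem.1, h, hmem.2.2⟩
      have := hafter j hjl (le_refl j)
      omega
    · rintro ⟨i, h1, h2, h3, h4⟩
      have hmem : i ∈ lst := by rw [hlst, mem_occB]; exact ⟨h2, by omega, h4⟩
      obtain ⟨k, hk, hik⟩ := List.getElem_of_mem hmem
      have hjk : j ≤ k := by
        by_contra hc
        have hblt := hbefore k hk (by omega)
        rw [hik] at hblt
        omega
      have hmono : lst[j] ≤ lst[k] := by
        rcases Nat.eq_or_lt_of_le hjk with he | hlt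
        · subst he; exact le_refl _
        · exact (List.pairwise_iff_getElem.mp hsorted) j k hjl hk hlt
      rw [hxx, hik] at hmono
      omega

-- entries of the precomputed dict are never overwritten
theorem buildOcc_keep (s : List Char) (verbs : List String) (k : String) (l : List Int)
    (d : PySem.Dict String (List Int)) (h : d.get? k = some l) :
    (verbs.foldl (fun d v => if d.contains v then d else d.insert v (occB s v.toList)) d).get? k
      = some l := by
  induction verbs generalizing d with
  | nil => exact h
  | cons u rest ih =>
    rw [List.foldl_cons]
    apply ih
    by_cases hc : d.contains u
    · rw [if_pos hc]; exact h
    · rw [if_neg hc]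
      have hne : k ≠ u := by
        intro he
        apply hc
        rw [PySem.Dict.contains_eq_isSome_get?, ← he, h]
        rfl
      rw [PySem.Dict.get?_insert_of_ne _ _ hne]
      exact h

-- the precomputed dict holds every verb's occurrence list
theorem buildOcc_get (s : List Char) (verbs : List String) (v : String) (hv : v ∈ verbs) :
    (buildOccB s verbs).get? v = some (occB s v.toList) := by
  unfold buildOccB
  suffices h : ∀ d : PySem.Dict String (List Int),
      (∀ k l, d.get? k = some l → l = occB s k.toList) →
      (verbs.foldl (fun d v => if d.contains v then d else d.insert v (occB s v.toList)) d).get? v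
        = some (occB s v.toList) by
    exact h PySem.Dict.empty (fun k l hk => by rw [PySem.Dict.get?_empty] at hk; cases hk)
  induction verbs with
  | nil => cases hv
  | cons u rest ih =>
    intro d hd
    rw [List.foldl_cons]
    by_cases hvu : v = u
    · subst hvu
      by_cases hc : d.contains v
      · rw [if_pos hc]
        rw [PySem.Dict.contains_eq_isSome_get?] at hc
        rcases hl : d.get? v with _ | l
        · rw [hl] at hc; cases hc
        · rw [hd v l hl] at hl
          exact buildOcc_keep s rest v _ d hl
      · rw [if_neg hc]
        exact buildOcc_keep s rest v _ _ (PySem.Dict.get?_insert_self _ _ _)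
    · have hvr : v ∈ rest := by
        rcases List.mem_cons.mp hv with h | h
        · exact absurd h hvu
        · exact h
      apply ih hvr
      by_cases hc : d.contains u
      · rw [if_pos hc]; exact hd
      · rw [if_neg hc]
        intro k l hk
        by_cases hku : k = u
        · subst hku
          rw [PySem.Dict.get?_insert_self] at hk
          cases hk; rfl
        · rw [PySem.Dict.get?_insert_of_ne _ _ hku] at hk
          exact hd k l hk

-- a nonempty verb as a character list
theorem verb_len_pos (v : String) (hv : v ≠ "") : 1 ≤ v.toList.length := by
  rcases Nat.eq_zero_or_pos v.toList.length with h | h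
  · exact absurd (String.ext (by simpa [List.length_eq_zero_iff] using h)) hv
  · exact h

-- under Pre_, A's window search from the leftover beg = -1 never matches:
-- the adjusted start is len-1, but the window ends before any nonempty verb there fits
theorem negWindow (s v term : List Char) (hv : 1 ≤ v.length)
    (he : 0 ≤ PySem.Chars.find s term) :
    PySem.Chars.findFrom s v (-1) (some (PySem.Chars.find s term)) = -1 := by
  set e := PySem.Chars.find s term with hedef
  have hen : e ≤ (s.length : Int) := PySem.Chars.find_le_length s term
  by_contra h
  obtain ⟨i, hmax, hi0, hie, hp⟩ := (condA_iff s v (-1) e (Or.inl rfl) he hen).mp h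
  have hplen : i.toNat + v.length ≤ s.length := by
    have := hp.length_le
    simp only [List.length_drop] at this
    omega
  by_cases hterm : term = []
  · rw [hterm, PySem.Chars.find_nil] at hedef
    omega
  · have hterm1 : 1 ≤ term.length := by
      rcases Nat.eq_zero_or_pos term.length with h0 | h0
      · exact absurd (List.eq_nil_of_length_eq_zero h0) hterm
      · exact h0
    have htlen : e + (term.length : Int) ≤ (s.length : Int) := by
      have hpre := (PySem.Chars.find_spec (s := s) (sub := term) he).1
      have := hpre.length_le
      simp only [List.length_drop] at this
      omega
    omega

-- where A appends nothing (the per-verb condition is everywhere false), the fold is id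
theorem foldA_nothing (s : List Char) (verbs : List String) (level last txt : String)
    (beg e : Int) (acc : List (List String))
    (h : ∀ v ∈ verbs, PySem.Chars.findFrom s v.toList beg (some e) = -1) :
    verbs.foldl (fun acc verb =>
        if PySem.Chars.findFrom s verb.toList beg (some e) ≠ -1 then
          acc ++ [[last, verb, txt, level]]
        else acc) acc = acc := by
  induction verbs generalizing acc with
  | nil => rfl
  | cons v rest ih =>
    rw [List.foldl_cons, if_neg (by simp [h v List.mem_cons_self])]
    exact ih acc (fun u hu => h u (List.mem_cons_of_mem v hu))

-- same for B's per-pair verb fold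
theorem foldB_nothing (occ : PySem.Dict String (List Int)) (verbs : List String)
    (level last txt : String) (lo hi : Int) (acc : List (List String))
    (h : ∀ v ∈ verbs, verbCheckB ((occ.get? v).getD []) (v.toList.length : Int) lo hi = false) :
    verbs.foldl (fun acc v =>
        if verbCheckB ((occ.get? v).getD []) (v.toList.length : Int) lo hi then
          acc ++ [[last, v, txt, level]]
        else acc) acc = acc := by
  induction verbs generalizing acc with
  | nil => rfl
  | cons v rest ih =>
    rw [List.foldl_cons, if_neg (by rw [h v List.mem_cons_self]; simp)]
    exact ih acc (fun u hu => h u (List.mem_cons_of_mem v hu))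

-- projections of getIndices
theorem getIndicesA_fst (t s : List Char) : (getIndicesA t s).1 = PySem.Chars.find s t := by
  unfold getIndicesA
  by_cases h : PySem.Chars.find s t = -1 <;> simp [h]

theorem getIndicesA_snd (t s : List Char) :
    (getIndicesA t s).2 = if PySem.Chars.find s t = -1 then -1
      else PySem.Chars.find s t + (t.length : Int) := by
  unfold getIndicesA
  by_cases h : PySem.Chars.find s t = -1 <;> simp [h]

-- a found occurrence fits inside the sentence
theorem find_add_len_le (s t : List Char) (h : 0 ≤ PySem.Chars.find s t) :
    PySem.Chars.find s t + (t.length : Int) ≤ (s.length : Int) := by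
  set f := PySem.Chars.find s t with hf
  clear_value f
  have hpre := (PySem.Chars.find_spec (s := s) (sub := t) (hf ▸ h)).1
  rw [← hf] at hpre
  have hlen := hpre.length_le
  simp only [List.length_drop] at hlen
  have hfl : f ≤ (s.length : Int) := hf ▸ PySem.Chars.find_le_length s t
  rcases Nat.eq_zero_or_pos t.length with h0 | h0
  · rw [h0]; simpa using hfl
  · have h3 : f.toNat ≤ s.length := by
      rcases Nat.le_total f.toNat s.length with hle | hle
      · exact hle
      · rw [Nat.sub_eq_zero_of_le hle, Nat.le_zero] at hlen
        exact absurd hlen (by omega)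
    have h5 := (Nat.cast_le (α := ℤ)).mpr ((Nat.le_sub_iff_add_le h3).mp hlen)
    push_cast at h5
    rw [Int.toNat_of_nonneg h] at h5
    linarith

-- the leftover beg = -1 window cannot contain "" either, when it ends before len-1
theorem negWindowEmpty (s : List Char) (e : Int) (he : 0 ≤ e)
    (hlt : e < max 0 ((s.length : Int) - 1)) :
    PySem.Chars.findFrom s [] (-1) (some e) = -1 := by
  have hmx : max 0 ((s.length : Int) - 1) ≤ (s.length : Int) := by
    apply max_le (by positivity) (by omega)
  have hen : e ≤ (s.length : Int) := le_trans (le_of_lt hlt) hmx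
  by_contra h
  obtain ⟨i, hmax, hi0, hie, _⟩ := (condA_iff s [] (-1) e (Or.inl rfl) he hen).mp h
  rw [if_pos (by norm_num : (-1:Int) < 0)] at hmax
  have hmeq : (-1:Int) + (s.length : Int) = (s.length : Int) - 1 := by ring
  rw [hmeq] at hmax
  simp only [List.length_nil, Nat.cast_zero, add_zero] at hie
  exact absurd (le_trans hmax hie) (not_le.mpr hlt)

-- one A-iteration from the state left by a previous term equals one B-pair step
theorem pair_eq (sentence : String) (verbs : List String) (level : String)
    (prev c : String × String) (acc : List (List String))
    (hz : "" ∈ verbs →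
      ¬ (PySem.Chars.find sentence.toList prev.2.toList = -1 ∧
          max 0 ((sentence.toList.length : Int) - 1) ≤ PySem.Chars.find sentence.toList c.2.toList) ∧
      ¬ (0 ≤ PySem.Chars.find sentence.toList prev.2.toList ∧
          PySem.Chars.find sentence.toList prev.2.toList + (prev.2.toList.length : Int)
            = PySem.Chars.find sentence.toList c.2.toList)) :
    stepA sentence.toList verbs level (acc, (getIndicesA prev.2.toList sentence.toList).2, prev.2) c
      = (pairStepB sentence.toList (buildOccB sentence.toList verbs) verbs level acc (prev, c),
         (getIndicesA c.2.toList sentence.toList).2, c.2) := by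
  set s := sentence.toList with hs
  have hfp1 : -1 ≤ PySem.Chars.find s prev.2.toList := PySem.Chars.neg_one_le_find s prev.2.toList
  have hfc1 : -1 ≤ PySem.Chars.find s c.2.toList := PySem.Chars.neg_one_le_find s c.2.toList
  have hfcn : PySem.Chars.find s c.2.toList ≤ (s.length : Int) :=
    PySem.Chars.find_le_length s c.2.toList
  unfold stepA pairStepB
  simp only [getIndicesA_fst, getIndicesA_snd, Prod.mk.injEq, and_true]
  by_cases hp : PySem.Chars.find s prev.2.toList = -1
  · -- previous term absent: A's beg is the leftover -1; B skips the pair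
    rw [if_pos hp, if_pos (Or.inl hp)]
    by_cases hc : (-1 : Int) < PySem.Chars.find s c.2.toList
    · rw [if_pos hc]
      apply foldA_nothing
      intro v hv
      by_cases hvz : v = ""
      · subst hvz
        have hlt : PySem.Chars.find s c.2.toList < max 0 ((s.length : Int) - 1) := by
          have := (hz hv).1
          rw [not_and] at this
          exact lt_of_not_ge (this hp)
        have htl : ("" : String).toList = ([] : List Char) := rfl
        rw [htl]
        exact negWindowEmpty s (PySem.Chars.find s c.2.toList) (by omega) hlt
      · exact negWindow s v.toList c.2.toList (verb_len_pos v hvz) (by omega)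
    · rw [if_neg hc]
  · -- previous term found: beg = find(prev) + len(prev) ≥ 0
    have hfp0 : 0 ≤ PySem.Chars.find s prev.2.toList := by omega
    rw [if_neg hp]
    have hbeg0 : 0 ≤ PySem.Chars.find s prev.2.toList + (prev.2.toList.length : Int) := by positivity
    have hbegn : PySem.Chars.find s prev.2.toList + (prev.2.toList.length : Int) ≤ (s.length : Int) :=
      find_add_len_le s prev.2.toList hfp0
    by_cases hc : PySem.Chars.find s c.2.toList = -1
    · -- current term absent: A's guard beg < -1 fails; B skips the pair
      rw [if_pos (Or.inr hc), hc, if_neg (by omega)]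
    · have hfc0 : 0 ≤ PySem.Chars.find s c.2.toList := by omega
      rw [if_neg (show ¬(PySem.Chars.find s prev.2.toList = -1 ∨ PySem.Chars.find s c.2.toList = -1) from
        fun h => h.elim hp hc)]
      by_cases hlt : PySem.Chars.find s prev.2.toList + (prev.2.toList.length : Int)
          < PySem.Chars.find s c.2.toList
      · rw [if_pos hlt, if_neg (by omega : ¬ PySem.Chars.find s c.2.toList
            < PySem.Chars.find s prev.2.toList + (prev.2.toList.length : Int))]
        apply PySem.List.foldl_congr_mem
        intro acc'' v hv
        rw [buildOcc_get s verbs v hv]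
        simp only [Option.getD_some]
        have hA := condA_iff s v.toList
          (PySem.Chars.find s prev.2.toList + (prev.2.toList.length : Int))
          (PySem.Chars.find s c.2.toList) (Or.inr ⟨hbeg0, hbegn⟩) hfc0 hfcn
        rw [if_neg (by omega : ¬ PySem.Chars.find s prev.2.toList + (prev.2.toList.length : Int) < (0:Int))] at hA
        exact if_congr (hA.trans (condB_iff s v.toList _ (PySem.Chars.find s c.2.toList) hfcn).symm) rfl rfl
      · rw [if_neg hlt]
        by_cases hhl : PySem.Chars.find s c.2.toList
            < PySem.Chars.find s prev.2.toList + (prev.2.toList.length : Int)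
        · rw [if_pos hhl]
        · rw [if_neg hhl]
          symm
          apply foldB_nothing
          intro v hv
          rw [buildOcc_get s verbs v hv]
          simp only [Option.getD_some]
          by_contra hb
          rw [Bool.not_eq_false,
            condB_iff s v.toList _ (PySem.Chars.find s c.2.toList) hfcn] at hb
          obtain ⟨i, h1, _, h3, _⟩ := hb
          by_cases hvz : v = ""
          · subst hvz
            have hlen0 : ((("" : String).toList.length : Nat) : Int) = 0 := rfl
            rw [hlen0] at h3
            exact (hz hv).2 ⟨hfp0, by omega⟩
          · have := verb_len_pos v hvz
            omega

-- A's fold after the first term, against B's fold over the adjacent pairs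
theorem main_fold (sentence : String) (verbs : List String) (level : String)
    (rest : List (String × String)) (prev : String × String) (acc : List (List String))
    (hz : ∀ pc ∈ (prev :: rest).zip rest, "" ∈ verbs →
      ¬ (PySem.Chars.find sentence.toList pc.1.2.toList = -1 ∧
          max 0 ((sentence.toList.length : Int) - 1) ≤ PySem.Chars.find sentence.toList pc.2.2.toList) ∧
      ¬ (0 ≤ PySem.Chars.find sentence.toList pc.1.2.toList ∧
          PySem.Chars.find sentence.toList pc.1.2.toList + (pc.1.2.toList.length : Int)
            = PySem.Chars.find sentence.toList pc.2.2.toList)) :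
    (rest.foldl (stepA sentence.toList verbs level)
        (acc, (getIndicesA prev.2.toList sentence.toList).2, prev.2)).1
      = ((prev :: rest).zip rest).foldl
          (pairStepB sentence.toList (buildOccB sentence.toList verbs) verbs level) acc := by
  induction rest generalizing prev acc with
  | nil => rfl
  | cons c rest' ih =>
    rw [List.foldl_cons,
      pair_eq sentence verbs level prev c acc (hz (prev, c) (by rw [List.zip_cons_cons]; exact List.mem_cons_self)),
      List.zip_cons_cons, List.foldl_cons]
    exact ih c _ (fun pc hpc => hz pc (by rw [List.zip_cons_cons]; exact List.mem_cons_of_mem _ hpc))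

-- ===== VERDICT (by name: the statement is the Claim_ definition above) =====
theorem buildTuples_spec : Claim_unchanged_buildTuples := by
  intro sentence terms verbs level _hdom hpre
  unfold Spec_buildTuples
  intro hnd
  unfold buildTuples buildTuples_alt
  cases terms with
  | nil => rfl
  | cons t0 rest =>
    have hzAll : ∀ pc ∈ (t0 :: rest).zip rest, "" ∈ verbs →
        ¬ (PySem.Chars.find sentence.toList pc.1.2.toList = -1 ∧
            max 0 ((sentence.toList.length : Int) - 1) ≤ PySem.Chars.find sentence.toList pc.2.2.toList) ∧
        ¬ (0 ≤ PySem.Chars.find sentence.toList pc.1.2.toList ∧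
            PySem.Chars.find sentence.toList pc.1.2.toList + (pc.1.2.toList.length : Int)
              = PySem.Chars.find sentence.toList pc.2.2.toList) := by
      intro pc hpc hmem
      constructor
      · intro hc1
        exact hnd ⟨hmem, pc, hpc, Or.inl hc1⟩
      · intro hc2
        exact hnd ⟨hmem, pc, hpc, Or.inr hc2⟩
    have hfirst : stepA sentence.toList verbs level ([], -1, "") t0
        = ([], (getIndicesA t0.2.toList sentence.toList).2, t0.2) := by
      set s := sentence.toList with hs
      unfold stepA
      simp only [getIndicesA_fst, Prod.mk.injEq, and_true]
      by_cases hlt : (-1 : Int) < PySem.Chars.find s t0.2.toList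
      · rw [if_pos hlt]
        apply foldA_nothing
        intro v hv
        by_cases hvz : v = ""
        · subst hvz
          have hless : PySem.Chars.find s t0.2.toList < max 0 ((s.length : Int) - 1) := by
            by_contra hge
            exact hpre ⟨t0, by simp, hv, le_of_not_gt hge⟩
          have htl : ("" : String).toList = ([] : List Char) := rfl
          rw [htl]
          exact negWindowEmpty s (PySem.Chars.find s t0.2.toList) (by omega) hless
        · exact negWindow s v.toList t0.2.toList (verb_len_pos v hvz) (by omega)
      · rw [if_neg hlt]
    rw [List.foldl_cons, hfirst, main_fold sentence verbs level rest t0 [] hzAll]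
    simp [List.zip]

theorem buildTuples_changed : Claim_changed_buildTuples := by
  unfold Claim_changed_buildTuples; decide
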